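-- pv_equiv track=rewrite | github.com/YisakH/Ps | 프로그래머스/2/152996. 시소 짝꿍/시소 짝꿍.py | solution
-- ===== SOURCE A (Python) =====
-- from collections import Counter
--
-- def solution(weights):
--     answer = 0
--
--     weights.sort()
--     cou = Counter(weights)
--     cou_keys = sorted(cou.keys())
--
--     for key, val in cou.items():
--         if val > 1:
--             answer += val*(val-1) // 2
--
--     for w in cou_keys:
--         t_list = [w * i for i in [2,3,4]]
--         w2_list = set()
--
--         for t in t_list:
--             for i in [2, 3, 4]:
--                 if t%i == 0 and t//i >= w:
--                     w2_list.add(t//i)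
--
--         w2_list.remove(w)
--
--         for w2 in w2_list:
--             if w2 in cou:
--                 answer += cou[w] * cou[w2]
--
--     return answer
-- ===== SOURCE B (Python) =====
-- def solution(weights):
--     weights.sort()
--     answer = 0
--     for i in range(len(weights)):
--         a = weights[i]
--         for b in weights[i + 1:]:
--             if any(a * p == b * q for p in (2, 3, 4) for q in (2, 3, 4)):
--                 answer += 1
--     return answer
-- ===== Notes on version B (the rewrite author's own statement) =====
-- stated objective: simpler
-- what changed: A builds a Counter, iterates its items for equal-weight pairs and then, per distinct weight, constructs a set of reachable partner weights via %/// ratio arithmetic and multiplies counts; B just sorts and runs one naive nested scan over all index pairs i<j, counting a pair when some arm pair (p,q) in {2,3,4}^2 satisfies a*p == b*q.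
import Mathlib
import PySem

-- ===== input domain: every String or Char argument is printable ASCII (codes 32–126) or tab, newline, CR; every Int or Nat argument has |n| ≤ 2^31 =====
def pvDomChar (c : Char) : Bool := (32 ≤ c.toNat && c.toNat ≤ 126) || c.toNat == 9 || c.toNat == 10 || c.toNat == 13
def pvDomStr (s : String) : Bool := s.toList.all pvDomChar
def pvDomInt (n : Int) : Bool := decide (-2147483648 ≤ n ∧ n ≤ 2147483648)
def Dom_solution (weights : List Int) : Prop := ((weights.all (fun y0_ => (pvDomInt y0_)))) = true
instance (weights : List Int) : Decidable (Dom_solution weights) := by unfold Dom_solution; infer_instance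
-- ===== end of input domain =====

-- B replaces A's Counter + ratio-table index with one plain nested scan over all pairs of the
-- sorted list (objective: simpler; not faster). Both Pythons sort `weights` in place (the same
-- side effect); the equivalence proved here is about the return value.

-- ===== PORT A =====
-- Python's set.remove(w) raises KeyError when w is absent; here w = (w*2)//2 with (w*2)%2 == 0
-- and (w*2)//2 = w >= w is always inserted before the remove (the p = q = 2 case of lemma
-- mem_w2set below, with rel_self), so `discard` is exact on every input.
def solution (weights : List Int) : Int :=
  let ws := PySem.List.sorted weights (fun x => x) false
  let cou : PySem.Dict Int Int := PySem.Dict.counter ws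
  let cou_keys := PySem.List.sorted cou.keys (fun x => x) false
  let answer : Int := 0
  let answer := cou.items.foldl (fun acc kv =>
      if kv.2 > 1 then acc + PySem.Int.floordiv (kv.2 * (kv.2 - 1)) 2 else acc) answer
  cou_keys.foldl (fun acc w =>
      let t_list := [(2 : Int), 3, 4].map (fun i => w * i)
      let w2_list : PySem.Set Int := t_list.foldl (fun s t =>
          [(2 : Int), 3, 4].foldl (fun s i =>
              if PySem.Int.mod t i = 0 ∧ PySem.Int.floordiv t i ≥ w then
                PySem.Set.add s (PySem.Int.floordiv t i)
              else s) s) PySem.Set.empty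
      let w2_list := PySem.Set.discard w2_list w
      w2_list.foldl (fun acc w2 =>
          if cou.contains w2 then acc + cou.getD w 0 * cou.getD w2 0 else acc) acc) answer

-- ===== PORT B =====
def solution_alt (weights : List Int) : Int :=
  let ws := PySem.List.sorted weights (fun x => x) false
  (PySem.List.pyRange 0 (PySem.List.len ws) 1).foldl (fun answer i =>
      let a := PySem.List.pyGetD ws i 0
      (PySem.List.slice ws (some (i + 1)) none).foldl (fun answer b =>
          if [(2 : Int), 3, 4].any (fun p => [(2 : Int), 3, 4].any (fun q => a * p == b * q)) then
            answer + 1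
          else answer) answer) 0

-- ===== PRECONDITION & SPEC =====
def Spec_solution (weights : List Int) (out : Int) : Prop := out = solution_alt weights
instance (weights : List Int) (out : Int) : Decidable (Spec_solution weights out) := by unfold Spec_solution; infer_instance

-- ===== CLAIM (what is proved, stated in full; the proofs are below) =====
def Claim_equal_solution : Prop := ∀ (weights : List Int), Dom_solution weights → Spec_solution weights (solution weights)

-- ===== LEMMAS AND PROOFS =====

-- the pair test of B: some arm pair (p, q) ∈ {2,3,4}² balances a and b
def rel (a b : Int) : Bool :=
  [(2 : Int), 3, 4].any (fun p => [(2 : Int), 3, 4].any (fun q => a * p == b * q))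

theorem rel_self (a : Int) : rel a a = true := by simp [rel]

-- number of index pairs i < j of s whose elements satisfy rel
def pairCount : List Int → Int
  | [] => 0
  | a :: t => (t.countP (rel a) : Int) + pairCount t

-- C2 n = n choose 2
def C2 (n : Nat) : Int := (n * (n - 1) / 2 : Nat)

-- the same count grouped by distinct values, the shape A computes
def grouped (t : List Int) : Int :=
  ∑ w ∈ t.toFinset, (C2 (t.count w) +
    ∑ w2 ∈ t.toFinset,
      (if w < w2 ∧ rel w w2 then (t.count w : Int) * (t.count w2 : Int) else 0))

theorem sum_countP_eq_pairCount (s : List Int) :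
    ((List.range s.length).map
      (fun i => ((s.drop (i+1)).countP (rel (s.getD i 0)) : Int))).sum = pairCount s := by
  induction s with
  | nil => simp [pairCount]
  | cons a t ih =>
    rw [List.length_cons, List.range_succ_eq_map]
    simp only [List.map_cons, List.map_map, List.sum_cons]
    have : ((List.range t.length).map
        ((fun i => (((a :: t).drop (i+1)).countP (rel ((a :: t).getD i 0)) : Int)) ∘ (· + 1))).sum
        = ((List.range t.length).map
          (fun i => ((t.drop (i+1)).countP (rel (t.getD i 0)) : Int))).sum := by
      apply congrArg; apply List.map_congr_left; intro i _; simp [List.getD]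
    rw [this, ih]
    simp [pairCount]

theorem b_eq_paircount (weights : List Int) :
    solution_alt weights = pairCount (PySem.List.sorted weights (fun x => x) false) := by
  unfold solution_alt
  set ws := PySem.List.sorted weights (fun x => x) false with hws
  simp only [PySem.List.len_eq, PySem.List.pyRange_one, List.foldl_map]
  have hb : ∀ (x : Int) (y : Nat),
      (List.foldl (fun answer b =>
          if ([(2:Int),3,4].any fun p => [(2:Int),3,4].any fun q =>
              PySem.List.pyGetD ws (0 + (y:Int)) 0 * p == b * q) = true then answer + 1
          else answer) x (PySem.List.slice ws (some (0 + (y:Int) + 1)) none))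
      = x + ((ws.drop (y+1)).countP (rel (ws.getD y 0)) : Int) := by
    intro x y
    have h1 : ((0:Int) + (y:Int) + 1) = ((y + 1 : Nat) : Int) := by omega
    have h2 : ((0:Int) + (y:Int)) = ((y : Nat) : Int) := by omega
    rw [h1, h2, PySem.List.slice_from_natCast, PySem.List.pyGetD_natCast,
      PySem.List.foldl_if_add_one]
    rfl
  simp only [hb]
  rw [PySem.List.foldl_add]
  simpa using sum_countP_eq_pairCount ws

-- membership in a conditional-add fold
theorem mem_foldl_condAdd {β : Type} (L : List β) (P : β → Prop) [DecidablePred P]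
    (f : β → Int) (s : PySem.Set Int) (y : Int) :
    (y ∈ L.foldl (fun s i => if P i then PySem.Set.add s (f i) else s) s) ↔
      (y ∈ s ∨ ∃ i ∈ L, P i ∧ y = f i) := by
  induction L generalizing s with
  | nil => simp
  | cons b L ih =>
    simp only [List.foldl_cons, ih]
    by_cases hb : P b
    · rw [if_pos hb]
      simp only [PySem.Set.mem_add, List.mem_cons]
      constructor
      · rintro ((hy | rfl) | ⟨i, hi, hP, rfl⟩)
        · exact Or.inl hy
        · exact Or.inr ⟨b, Or.inl rfl, hb, rfl⟩
        · exact Or.inr ⟨i, Or.inr hi, hP, rfl⟩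
      · rintro (hy | ⟨i, (rfl | hi), hP, rfl⟩)
        · exact Or.inl (Or.inl hy)
        · exact Or.inl (Or.inr rfl)
        · exact Or.inr ⟨i, hi, hP, rfl⟩
    · rw [if_neg hb]
      simp only [List.mem_cons]
      constructor
      · rintro (hy | ⟨i, hi, hP, rfl⟩)
        · exact Or.inl hy
        · exact Or.inr ⟨i, Or.inr hi, hP, rfl⟩
      · rintro (hy | ⟨i, (rfl | hi), hP, rfl⟩)
        · exact Or.inl hy
        · exact absurd hP hb
        · exact Or.inr ⟨i, hi, hP, rfl⟩

theorem nodup_foldl_condAdd {β : Type} (L : List β) (P : β → Prop) [DecidablePred P]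
    (f : β → Int) (s : PySem.Set Int) (h : s.Nodup) :
    (L.foldl (fun s i => if P i then PySem.Set.add s (f i) else s) s).Nodup := by
  induction L generalizing s with
  | nil => exact h
  | cons b L ih =>
    simp only [List.foldl_cons]
    by_cases hb : P b
    · simp only [if_pos hb]; exact ih _ (PySem.Set.nodup_add _ _ h)
    · simp only [if_neg hb]; exact ih _ h

theorem rel_iff (w y : Int) :
    rel w y = true ↔ ∃ p ∈ [(2:Int),3,4], ∃ q ∈ [(2:Int),3,4], w * p = y * q := by
  simp [rel]


theorem mem_foldl_condAdd2 {α β : Type} (L1 : List α) (L2 : List β)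
    (P : α → β → Prop) [∀ a b, Decidable (P a b)] (f : α → β → Int)
    (s : PySem.Set Int) (y : Int) :
    (y ∈ L1.foldl (fun s t => L2.foldl (fun s i =>
        if P t i then PySem.Set.add s (f t i) else s) s) s) ↔
      (y ∈ s ∨ ∃ t ∈ L1, ∃ i ∈ L2, P t i ∧ y = f t i) := by
  induction L1 generalizing s with
  | nil => simp
  | cons a L1 ih =>
    simp only [List.foldl_cons, ih, mem_foldl_condAdd L2 (P a) (f a) s y, List.mem_cons]
    constructor
    · rintro ((hy | ⟨i, hi, hP, rfl⟩) | ⟨t, ht, i, hi, hP, rfl⟩)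
      · exact Or.inl hy
      · exact Or.inr ⟨a, Or.inl rfl, i, hi, hP, rfl⟩
      · exact Or.inr ⟨t, Or.inr ht, i, hi, hP, rfl⟩
    · rintro (hy | ⟨t, (rfl | ht), i, hi, hP, rfl⟩)
      · exact Or.inl (Or.inl hy)
      · exact Or.inl (Or.inr ⟨i, hi, hP, rfl⟩)
      · exact Or.inr ⟨t, ht, i, hi, hP, rfl⟩

theorem nodup_foldl_condAdd2 {α β : Type} (L1 : List α) (L2 : List β)
    (P : α → β → Prop) [∀ a b, Decidable (P a b)] (f : α → β → Int)
    (s : PySem.Set Int) (h : s.Nodup) :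
    (L1.foldl (fun s t => L2.foldl (fun s i =>
        if P t i then PySem.Set.add s (f t i) else s) s) s).Nodup := by
  induction L1 generalizing s with
  | nil => exact h
  | cons a L1 ih =>
    exact ih _ (nodup_foldl_condAdd L2 (P a) (f a) s h)

-- the set built by A's inner double loop for key w
def w2set (w : Int) : PySem.Set Int :=
  ([(2 : Int), 3, 4].map (fun i => w * i)).foldl (fun s t =>
      [(2 : Int), 3, 4].foldl (fun s i =>
          if PySem.Int.mod t i = 0 ∧ PySem.Int.floordiv t i ≥ w then
            PySem.Set.add s (PySem.Int.floordiv t i)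
          else s) s) PySem.Set.empty

theorem pos_of_mem_triple {q : Int} (h : q ∈ [(2:Int),3,4]) : 0 < q := by
  simp only [List.mem_cons, List.not_mem_nil, or_false] at h
  rcases h with rfl | rfl | rfl <;> norm_num

theorem mem_w2set (w y : Int) : y ∈ w2set w ↔ (w ≤ y ∧ rel w y = true) := by
  unfold w2set
  rw [List.foldl_map,
    mem_foldl_condAdd2 [(2:Int),3,4] [(2:Int),3,4]
      (fun p i => PySem.Int.mod (w * p) i = 0 ∧ PySem.Int.floordiv (w * p) i ≥ w)
      (fun p i => PySem.Int.floordiv (w * p) i) PySem.Set.empty y]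
  simp only [PySem.Set.empty, List.not_mem_nil, false_or, rel_iff]
  constructor
  · rintro ⟨p, hp, q, hq, ⟨hmod, hge⟩, rfl⟩
    have hqpos := pos_of_mem_triple hq
    have hdvd : q ∣ w * p := (PySem.Int.mod_eq_zero_iff_dvd _ _).mp hmod
    rw [PySem.Int.floordiv_eq_ediv_of_pos hqpos] at hge ⊢
    exact ⟨hge, p, hp, q, hq, (Int.ediv_mul_cancel hdvd).symm⟩
  · rintro ⟨hle, p, hp, q, hq, heq⟩
    have hqpos := pos_of_mem_triple hq
    refine ⟨p, hp, q, hq, ⟨?_, ?_⟩, ?_⟩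
    · exact (PySem.Int.mod_eq_zero_iff_dvd _ _).mpr ⟨y, by linarith [heq]⟩
    · rw [PySem.Int.floordiv_eq_ediv_of_pos hqpos, heq,
        Int.mul_ediv_cancel _ (by omega)]
      exact hle
    · rw [PySem.Int.floordiv_eq_ediv_of_pos hqpos, heq,
        Int.mul_ediv_cancel _ (by omega)]


theorem mem_w2set_discard (w y : Int) :
    y ∈ PySem.Set.discard (w2set w) w ↔ (w < y ∧ rel w y = true) := by
  rw [PySem.Set.mem_discard, mem_w2set]
  constructor
  · rintro ⟨⟨hle, hr⟩, hne⟩; exact ⟨lt_of_le_of_ne hle (Ne.symm hne), hr⟩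
  · rintro ⟨hlt, hr⟩; exact ⟨⟨le_of_lt hlt, hr⟩, ne_of_gt hlt⟩

theorem nodup_w2set_discard (w : Int) : (PySem.Set.discard (w2set w) w).Nodup := by
  apply PySem.Set.nodup_discard
  unfold w2set
  rw [List.foldl_map]
  exact nodup_foldl_condAdd2 _ _ _ _ _ (by simp [PySem.Set.empty])

-- step form of A's first loop body: the val > 1 test is redundant against C2
theorem c2_step (x : Int) (n : Nat) :
    (if ((n : Int)) > 1 then x + PySem.Int.floordiv ((n : Int) * ((n : Int) - 1)) 2 else x)
      = x + C2 n := by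
  by_cases h : (1 : Int) < (n : Int)
  · rw [if_pos h, PySem.Int.floordiv_eq_ediv_of_pos (by norm_num : (0:Int) < 2)]
    have hn : 1 ≤ n := by exact_mod_cast le_of_lt h
    have h1 : ((n : Int) - 1) = ((n - 1 : Nat) : Int) := by push_cast [Nat.cast_sub hn]; ring
    rw [h1, ← Nat.cast_mul, C2]
    rw [show ((n * (n-1) / 2 : Nat) : Int) = ((n*(n-1) : Nat) : Int) / ((2:Nat):Int) from Int.natCast_ediv _ 2]
    norm_num
  · rw [if_neg h]
    have hn : n = 0 ∨ n = 1 := by omega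
    rcases hn with rfl | rfl <;> simp [C2]

-- A's second-loop inner body, per set element
theorem inner_step (ws : List Int) (w : Int) (x w2 : Int) :
    (if (PySem.Dict.counter ws).contains w2 then
        x + (PySem.Dict.counter ws).getD w 0 * (PySem.Dict.counter ws).getD w2 0
      else x)
      = x + (if w2 ∈ ws then (ws.count w : Int) * (ws.count w2 : Int) else 0) := by
  rw [PySem.Dict.contains_counter, PySem.Dict.getD_counter, PySem.Dict.getD_counter]
  by_cases h : w2 ∈ ws
  · rw [if_pos (List.contains_iff_mem.mpr h), if_pos h]
  · rw [if_neg (by simpa using h), if_neg h, add_zero]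

-- a Nodup list's map-sum as a Finset sum over its members
theorem map_sum_eq_finset_sum (l : List Int) (hl : l.Nodup) (f : Int → Int) :
    (l.map f).sum = ∑ w ∈ l.toFinset, f w :=
  (List.sum_toFinset f hl).symm

theorem a_eq_grouped (weights : List Int) :
    solution weights = grouped (PySem.List.sorted weights (fun x => x) false) := by
  unfold solution
  dsimp only
  set ws := PySem.List.sorted weights (fun x => x) false with hws
  -- first loop
  rw [PySem.Dict.items_counter, List.foldl_map]
  have h1 : ∀ (x : Int) (k : Int),
      (fun (acc : Int) (kv : Int × Int) =>
        if kv.2 > 1 then acc + PySem.Int.floordiv (kv.2 * (kv.2 - 1)) 2 else acc) x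
        ((fun k => (k, (ws.count k : Int))) k) = x + C2 (ws.count k) := by
    intro x k; exact c2_step x (ws.count k)
  simp only [h1]
  rw [PySem.List.foldl_add]
  -- second loop: keys and inner fold
  rw [PySem.Dict.keys_counter]
  have h2 : ∀ (x : Int) (w : Int),
      (PySem.Set.discard (w2set w) w).foldl (fun acc w2 =>
          if (PySem.Dict.counter ws).contains w2 then
            acc + (PySem.Dict.counter ws).getD w 0 * (PySem.Dict.counter ws).getD w2 0
          else acc) x
        = x + ((PySem.Set.discard (w2set w) w).map
            (fun w2 => if w2 ∈ ws then (ws.count w : Int) * (ws.count w2 : Int) else 0)).sum := by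
    intro x w
    have hstep := inner_step ws w
    calc (PySem.Set.discard (w2set w) w).foldl (fun acc w2 =>
          if (PySem.Dict.counter ws).contains w2 then
            acc + (PySem.Dict.counter ws).getD w 0 * (PySem.Dict.counter ws).getD w2 0
          else acc) x
        = (PySem.Set.discard (w2set w) w).foldl (fun acc w2 =>
            acc + (if w2 ∈ ws then (ws.count w : Int) * (ws.count w2 : Int) else 0)) x := by
          apply PySem.List.foldl_congr_mem
          intro acc w2 _
          exact hstep acc w2
      _ = _ := PySem.List.foldl_add _ _ _
  have hw2 : ∀ w : Int,
      (([(2 : Int), 3, 4].map (fun i => w * i)).foldl (fun s t =>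
          [(2 : Int), 3, 4].foldl (fun s i =>
              if PySem.Int.mod t i = 0 ∧ PySem.Int.floordiv t i ≥ w then
                PySem.Set.add s (PySem.Int.floordiv t i)
              else s) s) PySem.Set.empty) = w2set w := fun _ => rfl
  simp only [hw2]
  simp only [h2]
  rw [PySem.List.foldl_add]
  -- now both loops are sums; move to Finset sums
  have hnodupSet : (PySem.Set.ofList ws).Nodup := PySem.Set.nodup_ofList ws
  have hsetFinset : (PySem.Set.ofList ws).toFinset = ws.toFinset := by
    apply Finset.ext; intro x
    simp [List.mem_toFinset, PySem.Set.mem_ofList]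
  have hsortNodup : (PySem.List.sorted (PySem.Set.ofList ws) (fun x => x) false).Nodup :=
    (PySem.List.sorted_perm _ _ _).nodup_iff.mpr hnodupSet
  have hsortFinset : (PySem.List.sorted (PySem.Set.ofList ws) (fun x => x) false).toFinset = ws.toFinset := by
    apply Finset.ext; intro x
    simp [List.mem_toFinset, PySem.List.mem_sorted, PySem.Set.mem_ofList]
  rw [map_sum_eq_finset_sum _ hnodupSet, hsetFinset,
    map_sum_eq_finset_sum _ hsortNodup, hsortFinset]
  -- inner sums
  have h3 : ∀ w : Int,
      ((PySem.Set.discard (w2set w) w).map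
          (fun w2 => if w2 ∈ ws then (ws.count w : Int) * (ws.count w2 : Int) else 0)).sum
        = ∑ w2 ∈ ws.toFinset,
            (if w < w2 ∧ rel w w2 then (ws.count w : Int) * (ws.count w2 : Int) else 0) := by
    intro w
    rw [map_sum_eq_finset_sum _ (nodup_w2set_discard w)]
    have e1 : ∀ w2 : Int, (if w2 ∈ ws then (ws.count w : Int) * (ws.count w2 : Int) else 0)
        = (if w2 ∈ ws.toFinset then (ws.count w : Int) * (ws.count w2 : Int) else 0) := by
      intro w2; simp [List.mem_toFinset]
    simp only [e1]
    rw [Finset.sum_ite_mem, Finset.inter_comm, ← Finset.sum_ite_mem]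
    apply Finset.sum_congr rfl
    intro w2 _
    congr 1
    simp only [List.mem_toFinset, mem_w2set_discard]
  simp only [h3]
  rw [grouped, Finset.sum_add_distrib]
  ring

theorem C2_succ (n : Nat) : C2 (n + 1) = C2 n + n := by
  unfold C2
  rw [← Nat.choose_two_right, ← Nat.choose_two_right, Nat.choose_succ_succ]
  push_cast [Nat.choose_one_right]
  ring

-- countP over a list as a count-weighted sum over its distinct values
theorem countP_eq_sum (p : Int → Bool) (l : List Int) :
    (l.countP p : Int) = ∑ w ∈ l.toFinset, (if p w then (l.count w : Int) else 0) := by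
  rw [List.countP_eq_length_filter, ← List.sum_toFinset_count_eq_length]
  push_cast
  rw [Finset.sum_subset
    (by intro x hx; rw [List.mem_toFinset] at hx ⊢; exact (List.mem_filter.mp hx).1)
    (by intro x _ hx
        simp only [List.mem_toFinset] at hx
        simp [List.count_eq_zero_of_not_mem hx])]
  apply Finset.sum_congr rfl
  intro w _
  by_cases hpw : p w
  · rw [if_pos hpw, List.count_filter hpw]
  · rw [if_neg hpw]
    have : w ∉ l.filter p := by
      intro hmem
      exact hpw ((List.mem_filter.mp hmem).2)
    simp [List.count_eq_zero_of_not_mem this]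

theorem paircount_eq_grouped (t : List Int) (h : t.Pairwise (· ≤ ·)) :
    pairCount t = grouped t := by
  induction t with
  | nil => simp [pairCount, grouped]
  | cons a t ih =>
    have ha : ∀ x ∈ t, a ≤ x := (List.pairwise_cons.mp h).1
    have hp : t.Pairwise (· ≤ ·) := (List.pairwise_cons.mp h).2
    rw [pairCount, ih hp]
    -- abbreviations
    set T := t.toFinset with hT
    -- counts in a :: t
    have hcount : ∀ w : Int, ((a :: t).count w : Int)
        = (t.count w : Int) + (if w = a then 1 else 0) := by
      intro w
      rcases eq_or_ne w a with rfl | hne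
      · simp
      · simp [hne, Ne.symm hne]
    -- S w : the rel-weighted count of strictly larger distinct values
    set S : Int → Int := fun w => ∑ w2 ∈ T,
        (if w < w2 ∧ rel w w2 then (t.count w2 : Int) else 0) with hS
    -- countP side
    have hcp : (t.countP (rel a) : Int) = (t.count a : Int) + S a := by
      rw [countP_eq_sum, hS]
      have : ∀ w ∈ T, (if rel a w then (t.count w : Int) else 0)
          = (if w = a then (t.count w : Int) else 0)
            + (if a < w ∧ rel a w then (t.count w : Int) else 0) := by
        intro w hw
        have haw : a ≤ w := ha w (List.mem_toFinset.mp hw)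
        rcases eq_or_ne w a with rfl | hne
        · simp [rel_self]
        · have hlt : a < w := lt_of_le_of_ne haw (Ne.symm hne)
          by_cases hr : rel a w
          · simp [hr, hne, hlt]
          · simp [hr, hne]
      rw [Finset.sum_congr rfl this, Finset.sum_add_distrib]
      congr 1
      rw [Finset.sum_ite_eq' T a (fun w => (t.count w : Int))]
      by_cases hmem : a ∈ T
      · simp [hmem]
      · simp [hmem, List.count_eq_zero_of_not_mem (by simpa [hT, List.mem_toFinset] using hmem)]
    rw [hcp]
    -- grouped side: grouped (a :: t) = grouped t + count a t + S a
    have hfactor : ∀ (c : Int → Int) (w : Int),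
        (∑ w2 ∈ T, (if w < w2 ∧ rel w w2 then c w * (t.count w2 : Int) else 0))
          = c w * S w := by
      intro c w
      rw [hS, Finset.mul_sum]
      apply Finset.sum_congr rfl
      intro w2 _
      by_cases hc : w < w2 ∧ rel w w2
      · rw [if_pos hc, if_pos hc]
      · rw [if_neg hc, if_neg hc, mul_zero]
    have hgt : grouped t = ∑ w ∈ T, (C2 (t.count w) + (t.count w : Int) * S w) := by
      unfold grouped
      apply Finset.sum_congr rfl
      intro w _
      rw [hfactor (fun w => (t.count w : Int)) w]
    have hinner : ∀ w, w ∈ insert a T →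
        (∑ w2 ∈ insert a T,
            (if w < w2 ∧ rel w w2 then ((a :: t).count w : Int) * ((a :: t).count w2 : Int) else 0))
          = ((a :: t).count w : Int) * S w := by
      intro w hw
      have haw : a ≤ w := by
        rcases Finset.mem_insert.mp hw with rfl | hw'
        · exact le_refl _
        · exact ha w (List.mem_toFinset.mp hw')
      rw [Finset.sum_insert_of_eq_zero_if_notMem
        (by intro _; rw [if_neg]; rintro ⟨hlt, _⟩; omega)]
      rw [← hfactor (fun w => ((a :: t).count w : Int)) w]
      apply Finset.sum_congr rfl
      intro w2 hw2
      by_cases hc : w < w2 ∧ rel w w2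
      · rcases eq_or_ne w2 a with rfl | hne
        · omega
        · rw [if_pos hc, if_pos hc, List.count_cons_of_ne (Ne.symm hne)]
      · rw [if_neg hc, if_neg hc]
    have hgrouped : grouped (a :: t)
        = ∑ w ∈ insert a T, (C2 ((a :: t).count w) + ((a :: t).count w : Int) * S w) := by
      unfold grouped
      rw [List.toFinset_cons, ← hT]
      apply Finset.sum_congr rfl
      intro w hw
      rw [hinner w hw]
    set g : Int → Int := fun w => C2 ((a :: t).count w) + ((a :: t).count w : Int) * S w with hg
    set gt : Int → Int := fun w => C2 (t.count w) + (t.count w : Int) * S w with hgtdef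
    have hgw : ∀ w, w ≠ a → g w = gt w := by
      intro w hne
      rw [hg, hgtdef]
      simp only
      rw [List.count_cons_of_ne (Ne.symm hne)]
    have hga : g a = gt a + (t.count a : Int) + S a := by
      rw [hg, hgtdef]
      simp only
      rw [List.count_cons_self, C2_succ]
      push_cast
      ring
    rw [hgrouped, hgt]
    by_cases hmem : a ∈ T
    · rw [Finset.insert_eq_self.mpr hmem]
      rw [← Finset.add_sum_erase T g hmem, ← Finset.add_sum_erase T gt hmem]
      have : ∑ x ∈ T.erase a, g x = ∑ x ∈ T.erase a, gt x := by
        apply Finset.sum_congr rfl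
        intro x hx
        exact hgw x (Finset.ne_of_mem_erase hx)
      rw [this, hga]
      ring
    · rw [Finset.sum_insert hmem]
      have h0 : (t.count a : Int) = 0 := by
        simp [List.count_eq_zero_of_not_mem (by simpa [hT, List.mem_toFinset] using hmem)]
      have hga' : g a = S a := by
        rw [hga, hgtdef]
        simp only
        have : t.count a = 0 := by exact_mod_cast h0
        rw [this]
        simp [C2]
      have : ∑ x ∈ T, g x = ∑ x ∈ T, gt x := by
        apply Finset.sum_congr rfl
        intro x hx
        refine hgw x ?_
        rintro rfl
        exact hmem hx
      rw [this, h0]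
      have hx : C2 (List.count a (a :: t)) + ((List.count a (a :: t) : Int)) * S a = g a := rfl
      rw [hx, hga']
      ring


-- ===== VERDICT (by name: the statement is the Claim_ definition above) =====
theorem solution_spec : Claim_equal_solution := by
  intro weights _
  show solution weights = solution_alt weights
  rw [a_eq_grouped, b_eq_paircount,
    paircount_eq_grouped _ (PySem.List.sorted_pairwise weights (fun x => x))]
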